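-- pv_equiv track=rewrite | github.com/saurav-soni/simplifi-assessment | main.py | inr_conversion
-- ===== SOURCE A (Python) =====
-- def inr_conversion(number):
--     '''
--     :param number: number(digit)
--     :return: INR Notation
--
--     1. Take the number into string
--     2. separate front and last 3 elements
--     3. Reversed to loop through and add commas from last of front string
--     4. Loop through front, take 2 elements and append it to result container
--     5. if last single digit left append it too
--     6. join back with ',' to get INR notation
--     '''
--
--     number = str(number)  # typecasting to string
--     return_list = []      # return container
--
--     # taking out last 3 digit as per our INR
--     front, last = number[:-3], number[-3:]    # 1234567 => '12345', '678'
--     return_list.append(last)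
--
--     # reversed the digit for easiness of adding commas
--     rev_front = front[::-1]  # '4321'
--     j = 0
--     for i in range(1, len(rev_front)+1):
--         # if 2nd digit, we add it to return_list in reversed order
--         if i % 2 == 0:
--             return_list.append(rev_front[j:i][::-1])  # return_list = ['678', '45', '23']
--             j = i
--
--         # if the len is odd and its last digit we add it as normal
--         elif i == len(rev_front):
--             return_list.append(rev_front[-1])       # return_list = ['678', '45', '23', '1']
--
--     # joined the list back to get desired output
--     inr = ','.join(return_list[::-1])
--     return inr
-- ===== SOURCE B (Python) =====
-- def inr_conversion(number):
--     s = str(number)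
--     n = len(s)
--     out = []
--     for idx, ch in enumerate(s):
--         if idx > 0 and (n - idx) >= 3 and (n - idx) % 2 == 1:
--             out.append(',')
--         out.append(ch)
--     return ''.join(out)
-- ===== Notes on version B (the rewrite author's own statement) =====
-- stated objective: simpler
-- what changed: Replaces A's front/last-three split, string reversal, even/odd chunk-slicing loop with a cursor, and reversed join by one forward pass over str(number) that inserts a comma before a non-initial character exactly when the remaining suffix length is odd and at least three.
import Mathlib
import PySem

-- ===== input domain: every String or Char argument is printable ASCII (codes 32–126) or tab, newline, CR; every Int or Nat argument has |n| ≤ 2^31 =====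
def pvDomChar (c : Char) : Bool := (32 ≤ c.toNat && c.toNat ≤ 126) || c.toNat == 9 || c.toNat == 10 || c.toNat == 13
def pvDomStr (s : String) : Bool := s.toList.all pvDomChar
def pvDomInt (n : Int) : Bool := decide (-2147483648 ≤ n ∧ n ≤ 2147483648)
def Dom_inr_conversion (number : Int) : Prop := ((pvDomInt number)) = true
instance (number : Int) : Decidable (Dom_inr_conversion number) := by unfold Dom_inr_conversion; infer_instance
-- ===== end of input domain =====

-- B replaces A's front/last-3 split, reversal and even/odd chunk-slicing loop by a single
-- forward pass inserting commas positionally (objective: simpler); the two agree on every Int.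


-- ===== PORT A =====
-- body of A's 'for i in range(1, len(rev_front)+1)' loop; state = (return_list, j)
def aBody (rev : List Char) (st : List (List Char) × Int) (i : Int) : List (List Char) × Int :=
  if PySem.Int.mod i 2 = 0 then
    (st.1 ++ [(PySem.List.slice rev (some st.2) (some i)).reverse], i)
  else if i = (rev.length : Int) then
    -- rev_front[-1]; the loop runs only when rev ≠ [], so pyGet? is some here
    (st.1 ++ [(PySem.List.pyGet? rev (-1)).elim [] (fun c => [c])], st.2)
  else st

def inr_conversion (number : Int) : String :=
  let s := PySem.Int.toChars number          -- str(number)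
  let front := PySem.List.slice s none (some (-3))   -- number[:-3]
  let lastP := PySem.List.slice s (some (-3)) none   -- number[-3:]
  let rev := front.reverse                   -- front[::-1] (PySem.List.slice?_none_none_neg_one)
  let st := (PySem.List.pyRange 1 ((rev.length : Int) + 1) 1).foldl (aBody rev) ([lastP], 0)
  String.ofList (PySem.Chars.join [','] st.1.reverse)   -- ','.join(return_list[::-1])

-- ===== PORT B =====
-- body of B's 'for idx, ch in enumerate(s)' loop; out is a list of chars
def bBody (n : Nat) (acc : List Char) (p : Int × Char) : List Char :=
  (if 0 < p.1 ∧ 3 ≤ (n : Int) - p.1 ∧ PySem.Int.mod ((n : Int) - p.1) 2 = 1 then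
    acc ++ [','] else acc) ++ [p.2]

def inr_conversion_alt (number : Int) : String :=
  let s := PySem.Int.toChars number          -- str(number)
  let n := s.length
  let out := (PySem.List.enumerate s 0).foldl (bBody n) []
  String.ofList out                          -- ''.join(out)

-- ===== PRECONDITION & SPEC =====
def Spec_inr_conversion (number : Int) (out : String) : Prop := out = inr_conversion_alt number
instance (number : Int) (out : String) : Decidable (Spec_inr_conversion number out) := by unfold Spec_inr_conversion; infer_instance

-- ===== CLAIM (what is proved, stated in full; the proofs are below) =====
def Claim_equal_inr_conversion : Prop := ∀ (number : Int), Dom_inr_conversion number → Spec_inr_conversion number (inr_conversion number)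

-- ===== LEMMAS AND PROOFS =====

-- pairs of rev taken left to right, each reversed back, as A's loop appends them
def P2 : List Char → List (List Char)
  | [] => []
  | [a] => [[a]]
  | a :: _b :: r => [_b, a] :: P2 r

-- B's output characterized by suffix length: comma between a char and the rest
-- exactly when the remaining suffix has odd length ≥ 3
def W : List Char → List Char
  | [] => []
  | a :: t => a :: (if t.length % 2 = 1 ∧ 3 ≤ t.length then ',' :: W t else W t)

-- A's grouping, consuming rev two at a time and prepending to the already-built tail
def g : List Char → List Char → List Char
  | [], L => L
  | [a], L => a :: ',' :: L
  | a :: b :: r, L => g r (b :: a :: ',' :: L)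

lemma pyGet_neg_one (xs : List Char) (h : xs ≠ []) :
    PySem.List.pyGet? xs (-1) = some (xs.getLast h) := by
  have hl : 1 ≤ xs.length := List.length_pos_iff.mpr h
  simp [PySem.List.pyGet?, PySem.List.pyIdx?, hl, Nat.sub_lt hl, List.getLast_eq_getElem]

-- A's loop, started at an even offset with j = off, appends the reversed-back pairs of
-- what is left of rev (plus the lone last char when that remainder has odd length)
lemma loopA_gen (big : List Char) :
    ∀ (r : List Char) (off : Nat) (acc : List (List Char)),
    big.drop off = r → off % 2 = 0 →
    ((PySem.List.pyRange ((off : Int) + 1) ((big.length : Int) + 1) 1).foldl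
      (aBody big) (acc, (off : Int))).1 = acc ++ P2 r := by
  intro r
  induction r using P2.induct with
  | case1 =>
    intro off acc hdrop _
    have hn : big.length ≤ off := by
      by_contra hlt
      have := List.drop_eq_nil_iff.mp hdrop; omega
    rw [PySem.List.pyRange_one_eq_nil (by omega)]
    simp [P2]
  | case2 a =>
    intro off acc hdrop _hoff
    have hoff_lt : off < big.length := by
      by_contra hlt
      rw [List.drop_eq_nil_iff.mpr (by omega)] at hdrop; simp at hdrop
    have hn : big.length = off + 1 := by
      have h1 := congrArg List.length hdrop
      simp [List.length_drop] at h1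
      omega
    have hrange : PySem.List.pyRange ((off : Int) + 1) ((big.length : Int) + 1) 1
        = [(off : Int) + 1] := by
      rw [hn]; push_cast; exact PySem.List.pyRange_one_singleton _
    rw [hrange, List.foldl_cons, List.foldl_nil]
    have hne : big ≠ [] := by intro h; rw [h] at hdrop; simp at hdrop
    have hlast : big.getLast hne = a := by
      rw [List.getLast_eq_getElem]
      have hd0 : 0 < (big.drop off).length := by rw [hdrop]; simp
      have h0 : (big.drop off)[0]'hd0 = a := by
        rw [List.getElem_of_eq hdrop]; rfl
      rw [← h0, List.getElem_drop]
      congr 1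
      omega
    unfold aBody
    rw [if_neg ?_, if_pos (by omega)]
    · simp [pyGet_neg_one big hne, hlast, P2]
    · have h2 : ((off : Int) + 1) = ((off + 1 : Nat) : Int) := by push_cast; ring
      rw [h2, show ((2:Int)) = ((2:Nat):Int) from rfl, PySem.Int.mod_natCast]
      omega
  | case3 a b r ih =>
    intro off acc hdrop hoff
    have hlt : off + 2 ≤ big.length := by
      have hoff_le : off < big.length := by
        by_contra hlt
        rw [List.drop_eq_nil_iff.mpr (by omega)] at hdrop; simp at hdrop
      have h1 := congrArg List.length hdrop
      simp [List.length_drop] at h1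
      omega
    rw [PySem.List.pyRange_one_cons (by omega), List.foldl_cons,
        PySem.List.pyRange_one_cons (by omega), List.foldl_cons]
    have hstep1 : aBody big (acc, (off : Int)) ((off : Int) + 1) = (acc, (off : Int)) := by
      unfold aBody
      rw [if_neg ?_, if_neg (by omega)]
      · have h2 : ((off : Int) + 1) = ((off + 1 : Nat) : Int) := by push_cast; ring
        rw [h2, show ((2:Int)) = ((2:Nat):Int) from rfl, PySem.Int.mod_natCast]; omega
    have hslice : (PySem.List.slice big (some (off : Int)) (some ((off : Int) + 1 + 1))).reverse
        = [b, a] := by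
      have h2 : ((off : Int) + 1 + 1) = (off : Int) + ((2 : Nat) : Int) := by push_cast; ring
      rw [h2, PySem.List.slice_natCast_add, hdrop]
      rfl
    have hstep2 : aBody big (acc, (off : Int)) ((off : Int) + 1 + 1)
        = (acc ++ [[b, a]], (off : Int) + 1 + 1) := by
      unfold aBody
      rw [if_pos ?_]
      · rw [hslice]
      · have h2 : ((off : Int) + 1 + 1) = ((off + 2 : Nat) : Int) := by push_cast; ring
        rw [h2, show ((2:Int)) = ((2:Nat):Int) from rfl, PySem.Int.mod_natCast]; omega
    rw [hstep1, hstep2]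
    have harg : (off : Int) + 1 + 1 + 1 = ((off + 2 : Nat) : Int) + 1 := by push_cast; ring
    have harg2 : (off : Int) + 1 + 1 = ((off + 2 : Nat) : Int) := by push_cast; ring
    rw [harg, harg2, ih (off + 2) (acc ++ [[b, a]]) (by rw [← List.drop_drop, hdrop]; rfl) (by omega)]
    simp [P2]

lemma join_append_pair (xs : List (List Char)) (u v : List Char) :
    PySem.Chars.join [','] (xs ++ [u, v]) = PySem.Chars.join [','] (xs ++ [u ++ ',' :: v]) := by
  induction xs with
  | nil =>
    simp [PySem.Chars.join_cons_cons, PySem.Chars.join_singleton]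
  | cons x xs ih =>
    match xs with
    | [] =>
      simp [PySem.Chars.join_cons_cons, PySem.Chars.join_singleton]
    | y :: ys =>
      simp only [List.cons_append] at ih ⊢
      rw [PySem.Chars.join_cons_cons, ih, ← PySem.Chars.join_cons_cons]

lemma join_P2 (r : List Char) : ∀ (L : List Char),
    PySem.Chars.join [','] ((P2 r).reverse ++ [L]) = g r L := by
  induction r using P2.induct with
  | case1 => intro L; simp [P2, g, PySem.Chars.join_singleton]
  | case2 a => intro L; simp [P2, g, PySem.Chars.join_cons_cons, PySem.Chars.join_singleton]
  | case3 a b r ih =>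
    intro L
    simp only [P2, g, List.reverse_cons, List.append_assoc]
    have h := join_append_pair ((P2 r).reverse) [b, a] L
    simp only [List.cons_append, List.nil_append] at h ⊢
    rw [h, ih]

lemma Bfold_gen (n : Nat) :
    ∀ (t : List Char) (start : Int) (acc : List Char),
    start = (n : Int) - (t.length : Int) → t.length ≤ n →
    (PySem.List.enumerate t start).foldl (bBody n) acc
      = acc ++ (if 0 < start ∧ (t.length % 2 = 1 ∧ 3 ≤ t.length) then ',' :: W t else W t) := by
  intro t
  induction t with
  | nil =>
    intro start acc _ _
    simp [PySem.List.enumerate_nil, W]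
  | cons a u ih =>
    intro start acc hs hle
    rw [PySem.List.enumerate_cons, List.foldl_cons]
    have hle' : u.length + 1 ≤ n := by simpa using hle
    have hmod : PySem.Int.mod ((n : Int) - start) 2 = (((u.length + 1) % 2 : Nat) : Int) := by
      have h1 : (n : Int) - start = ((u.length + 1 : Nat) : Int) := by
        simp only [List.length_cons] at hs; push_cast at hs ⊢; omega
      rw [h1]; exact PySem.Int.mod_natCast (u.length + 1) 2
    have hcond : (0 < start ∧ 3 ≤ (n : Int) - start ∧ PySem.Int.mod ((n : Int) - start) 2 = 1)
        ↔ (0 < start ∧ ((a :: u).length % 2 = 1 ∧ 3 ≤ (a :: u).length)) := by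
      rw [hmod]; simp only [List.length_cons] at hs ⊢; omega
    have hb : bBody n acc (start, a)
        = (if 0 < start ∧ ((a :: u).length % 2 = 1 ∧ 3 ≤ (a :: u).length)
            then acc ++ [','] else acc) ++ [a] := by
      show (if 0 < start ∧ 3 ≤ (n : Int) - start ∧ PySem.Int.mod ((n : Int) - start) 2 = 1
            then acc ++ [','] else acc) ++ [a] = _
      rw [if_congr hcond rfl rfl]
    rw [hb, ih (start + 1) _ (by simp only [List.length_cons] at hs ⊢; omega) (by omega)]
    have h01 : 0 < start + 1 := by simp only [List.length_cons] at hs; omega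
    simp only [h01, true_and]
    simp only [W]
    split_ifs <;> simp

lemma W_short (s : List Char) (h : s.length ≤ 3) : W s = s := by
  induction s with
  | nil => rfl
  | cons a t ih =>
    simp only [W]
    rw [if_neg (by simp at h; omega)]
    rw [ih (by simp at h; omega)]

lemma gW (r : List Char) : ∀ (T : List Char), 3 ≤ T.length → T.length % 2 = 1 →
    W (r.reverse ++ T) = g r (W T) := by
  induction r using P2.induct with
  | case1 => intro T _ _; simp [g]
  | case2 a =>
    intro T h3 hodd
    simp only [List.reverse_cons, List.reverse_nil, List.nil_append, List.cons_append, W, g]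
    rw [if_pos ⟨hodd, h3⟩]
  | case3 a b r ih =>
    intro T h3 hodd
    have h1 : (a :: b :: r).reverse ++ T = r.reverse ++ (b :: a :: T) := by simp
    rw [h1, ih (b :: a :: T) (by simp; omega) (by simp; omega)]
    have hW : W (b :: a :: T) = b :: a :: ',' :: W T := by
      show b :: (if (a :: T).length % 2 = 1 ∧ 3 ≤ (a :: T).length then _ else _) = _
      rw [if_neg (by simp; omega)]
      show b :: a :: (if T.length % 2 = 1 ∧ 3 ≤ T.length then _ else _) = _
      rw [if_pos ⟨hodd, h3⟩]
    rw [hW]; rfl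

lemma g_eq_W (s : List Char) :
    g (PySem.List.slice s none (some (-3))).reverse (PySem.List.slice s (some (-3)) none)
      = W s := by
  rw [PySem.List.slice_to_neg_ofNat s 3 (by omega), PySem.List.slice_from_neg_ofNat s 3 (by omega)]
  by_cases h3 : s.length ≤ 3
  · have h0 : s.length - 3 = 0 := by omega
    rw [h0, List.take_zero, List.drop_zero, W_short s h3]
    rfl
  · have hlen : (s.drop (s.length - 3)).length = 3 := by
      rw [List.length_drop]; omega
    have hgw := gW (s.take (s.length - 3)).reverse (s.drop (s.length - 3))
      (by omega) (by omega)
    rw [List.reverse_reverse, List.take_append_drop] at hgw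
    rw [W_short (s.drop (s.length - 3)) (by omega)] at hgw
    exact hgw.symm

lemma main_chars (s : List Char) :
    PySem.Chars.join [',']
      (((PySem.List.pyRange 1 (((PySem.List.slice s none (some (-3))).reverse.length : Int) + 1) 1).foldl
        (aBody (PySem.List.slice s none (some (-3))).reverse)
        ([PySem.List.slice s (some (-3)) none], 0)).1.reverse)
    = (PySem.List.enumerate s 0).foldl (bBody s.length) [] := by
  have hA := loopA_gen (PySem.List.slice s none (some (-3))).reverse
    (PySem.List.slice s none (some (-3))).reverse 0
    [PySem.List.slice s (some (-3)) none] List.drop_zero rfl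
  simp only [Nat.cast_zero, zero_add] at hA
  rw [hA]
  have hB := Bfold_gen s.length s 0 [] (by simp) le_rfl
  norm_num at hB
  rw [hB]
  simp only [List.singleton_append, List.reverse_cons]
  rw [join_P2]
  exact g_eq_W s

-- ===== VERDICT (by name: the statement is the Claim_ definition above) =====
theorem inr_conversion_spec : Claim_equal_inr_conversion := by
  intro number _
  unfold Spec_inr_conversion inr_conversion inr_conversion_alt
  exact congrArg String.ofList (main_chars (PySem.Int.toChars number))
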